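-- pv_equiv track=rewrite | github.com/CraigHutchinson/Sub0h264 | scripts/diff_traces.py | levels_to_raster
-- ===== SOURCE A (Python) =====
-- ZIGZAG = [0, 1, 4, 8, 5, 2, 3, 6, 9, 12, 13, 10, 7, 11, 14, 15]
--
-- def levels_to_raster(levels, sig_map_hex):
--     """Convert libavc sparse levels + sig_coeff_map to raster-order coefficients.
--     libavc stores levels in DECREASING scan position order.
--     """
--     sig_map = int(sig_map_hex, 16)
--     set_positions = []
--     for zigzag_pos in range(15, -1, -1):
--         if sig_map & (1 << zigzag_pos):
--             set_positions.append(zigzag_pos)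
--
--     coeffs = [0] * 16
--     for i, zigzag_pos in enumerate(set_positions):
--         if i < len(levels):
--             coeffs[ZIGZAG[zigzag_pos]] = levels[i]
--     return coeffs
-- ===== SOURCE B (Python) =====
-- ZIGZAG = [0, 1, 4, 8, 5, 2, 3, 6, 9, 12, 13, 10, 7, 11, 14, 15]
--
-- def levels_to_raster(levels, sig_map_hex):
--     """One ascending pass over the 16 scan positions: a set bit at zigzag
--     position z takes its level at index popcount(higher set bits), since
--     libavc stores levels in decreasing scan-position order."""
--     m = int(sig_map_hex, 16) % 0x10000
--     n = len(levels)
--     coeffs = [0] * 16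
--     for z in range(16):
--         if (m >> z) & 1:
--             k = (m >> (z + 1)).bit_count()
--             if k < n:
--                 coeffs[ZIGZAG[z]] = levels[k]
--     return coeffs
-- ===== Notes on version B (the rewrite author's own statement) =====
-- stated objective: alternative
-- what changed: A collects the set zigzag positions into an intermediate list (decreasing scan) and then enumerates that list to assign levels; B makes a single ascending pass over the 16 positions, computing each level's index arithmetically as the popcount of the higher set bits of the 16-bit mask, with no intermediate list and no enumeration.
import Mathlib
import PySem

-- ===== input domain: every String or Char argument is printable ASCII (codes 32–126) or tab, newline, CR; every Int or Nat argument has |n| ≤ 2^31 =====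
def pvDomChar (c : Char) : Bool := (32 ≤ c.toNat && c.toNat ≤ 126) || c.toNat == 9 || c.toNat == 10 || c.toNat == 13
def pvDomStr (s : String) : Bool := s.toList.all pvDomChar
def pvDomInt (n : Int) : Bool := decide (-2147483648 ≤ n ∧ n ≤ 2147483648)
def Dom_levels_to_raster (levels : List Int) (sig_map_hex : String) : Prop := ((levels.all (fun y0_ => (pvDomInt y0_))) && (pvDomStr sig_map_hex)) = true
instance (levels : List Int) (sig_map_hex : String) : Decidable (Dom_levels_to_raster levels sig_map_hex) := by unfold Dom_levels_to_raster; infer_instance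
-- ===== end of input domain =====

-- B replaces A's two-phase scheme (collect set zigzag positions in decreasing order, then
-- enumerate them) by a single ascending pass in which each set bit computes its level index
-- arithmetically as the popcount of the higher set bits (objective: alternative decomposition).

-- ===== PORT A =====
-- shared module constant ZIGZAG (its entries, used only as indices 0..15, are kept as Nat)
def pvZIGZAG : List Nat := [0, 1, 4, 8, 5, 2, 3, 6, 9, 12, 13, 10, 7, 11, 14, 15]
-- range(15, -1, -1) = [15, 14, ..., 0]: ported as this literal descending list (exact)
def pvDescRange : List Nat := [15, 14, 13, 12, 11, 10, 9, 8, 7, 6, 5, 4, 3, 2, 1, 0]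

def levels_to_raster (levels : List Int) (sig_map_hex : String) : List Int :=
  match PySem.Int.ofStrBase? sig_map_hex 16 with
  | none => []   -- int(sig_map_hex, 16) raises ValueError here: excluded by Pre_
  | some sig_map =>
    -- `if sig_map & (1 << zigzag_pos):` — 1 << z = 2^z (z ≥ 0), Python truthiness = ≠ 0
    let set_positions : List Nat :=
      pvDescRange.foldl (fun acc z =>
        if PySem.Int.band sig_map ((2 : Int) ^ z) ≠ 0 then acc ++ [z] else acc) []
    let coeffs : List Int := List.replicate 16 0
    -- ZIGZAG[zigzag_pos] with zigzag_pos < 16 is exact via getD; levels[i] is guarded by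
    -- 0 ≤ i < len(levels), so pyGetD is exact
    (PySem.List.enumerate set_positions).foldl (fun c iz =>
      if iz.1 < (levels.length : Int) then
        c.set (pvZIGZAG.getD iz.2 0) (PySem.List.pyGetD levels iz.1 0)
      else c) coeffs

-- ===== PORT B =====
def levels_to_raster_alt (levels : List Int) (sig_map_hex : String) : List Int :=
  match PySem.Int.ofStrBase? sig_map_hex 16 with
  | none => []   -- int(sig_map_hex, 16) raises ValueError here: excluded by Pre_
  | some sig =>
    -- m = int(...) % 0x10000 lies in [0, 65535]: represented as a Nat (exact)
    let m : Nat := (PySem.Int.mod sig 65536).toNat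
    let n := levels.length
    (List.range 16).foldl (fun c z =>
      if (m >>> z) &&& 1 = 1 then
        -- k = (m >> (z+1)).bit_count()
        let k := PySem.Int.bitCount ((m >>> (z + 1) : Nat) : Int)
        if k < n then c.set (pvZIGZAG.getD z 0) (levels.getD k 0) else c
      else c) (List.replicate 16 0)

-- ===== PRECONDITION & SPEC =====
-- Pre_ excludes exactly the strings on which int(sig_map_hex, 16) raises ValueError.
def Pre_levels_to_raster (levels : List Int) (sig_map_hex : String) : Prop :=
  (PySem.Int.ofStrBase? sig_map_hex 16).isSome = true
instance (levels : List Int) (sig_map_hex : String) : Decidable (Pre_levels_to_raster levels sig_map_hex) := by unfold Pre_levels_to_raster; infer_instance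

def pvWitness_levels_to_raster : List Int × String := ([3, -2], "2a")

def Spec_levels_to_raster (levels : List Int) (sig_map_hex : String) (out : List Int) : Prop := out = levels_to_raster_alt levels sig_map_hex
instance (levels : List Int) (sig_map_hex : String) (out : List Int) : Decidable (Spec_levels_to_raster levels sig_map_hex out) := by unfold Spec_levels_to_raster; infer_instance

-- ===== CLAIM (what is proved, stated in full; the proofs are below) =====
def Claim_equal_levels_to_raster : Prop := ∀ (levels : List Int) (sig_map_hex : String), Dom_levels_to_raster levels sig_map_hex → Pre_levels_to_raster levels sig_map_hex → Spec_levels_to_raster levels sig_map_hex (levels_to_raster levels sig_map_hex)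

-- ===== LEMMAS AND PROOFS =====

-- A's bit test, as a Bool
def pvBit (sig : Int) (z : Nat) : Bool := decide (PySem.Int.band sig ((2 : Int) ^ z) ≠ 0)

-- popcount on Nat (the shape B's bit_count reduces to)
def pvPc (x : Nat) : Nat :=
  if h : x = 0 then 0 else x % 2 + pvPc (x / 2)
decreasing_by exact Nat.div_lt_self (Nat.pos_of_ne_zero h) (by norm_num)

-- inverse of the ZIGZAG permutation
def pvINV : List Nat := [0, 1, 5, 6, 2, 4, 7, 12, 3, 8, 11, 13, 9, 10, 14, 15]

def pvTgt (z : Nat) : Nat := pvZIGZAG.getD z 0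
def pvInv (j : Nat) : Nat := pvINV.getD j 0

-- [k-1, ..., 0]
def pvDescList : Nat → List Nat
  | 0 => []
  | k + 1 => k :: pvDescList k

-- A's enumerate-fold, as a recursion carrying the running index
def pvAFold (levels : List Int) : List Int → Int → List Nat → List Int
  | c, _, [] => c
  | c, i, z :: zs =>
    pvAFold levels
      (if i < (levels.length : Int) then
        c.set (pvZIGZAG.getD z 0) (PySem.List.pyGetD levels i 0) else c) (i + 1) zs

-- the common one-write step both results are reduced to
def pvOp (levels : List Int) (m : Nat) (c : List Int) (z : Nat) : List Int :=
  if Nat.testBit m z then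
    if pvPc (m >>> (z + 1)) < levels.length then
      c.set (pvTgt z) (levels.getD (pvPc (m >>> (z + 1))) 0)
    else c
  else c

theorem pvPc_bitCount (x : Nat) : PySem.Int.bitCount (x : Int) = pvPc x := by
  induction x using Nat.strong_induction_on with
  | _ x ih =>
    rcases Nat.eq_zero_or_pos x with h | h
    · subst h; simp [pvPc, PySem.Int.bitCount_zero]
    · rw [PySem.Int.bitCount_natCast h, pvPc, dif_neg (Nat.pos_iff_ne_zero.mp h),
        ih (x / 2) (Nat.div_lt_self h (by norm_num))]

theorem pvTestBit_mod (m k : Nat) : Nat.testBit m k = decide ((m >>> k) % 2 = 1) := by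
  have := Nat.testBit_shiftRight (i := k) (j := 0) m
  rw [Nat.add_zero] at this
  rw [← this, Nat.testBit_zero]

theorem pvPc_step (m k : Nat) :
    pvPc (m >>> k) = (if Nat.testBit m k then 1 else 0) + pvPc (m >>> (k + 1)) := by
  rw [pvTestBit_mod, Nat.shiftRight_succ]
  rcases Nat.eq_zero_or_pos (m >>> k) with h | h
  · simp [h, pvPc]
  · rw [pvPc, dif_neg (Nat.pos_iff_ne_zero.mp h)]
    rcases Nat.mod_two_eq_zero_or_one (m >>> k) with h2 | h2 <;> simp [h2]

-- complement of r on n bits flips every bit below n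
theorem pvTestBit_compl (n r z : Nat) (hr : r < 2 ^ n) (hz : z < n) :
    Nat.testBit (2 ^ n - 1 - r) z = ! r.testBit z := by
  induction z generalizing n r with
  | zero =>
    have hn : n ≠ 0 := by omega
    obtain ⟨m, rfl⟩ := Nat.exists_eq_succ_of_ne_zero hn
    have h2 : 2 ^ (m + 1) = 2 * 2 ^ m := by ring
    rw [Nat.testBit_zero, Nat.testBit_zero]
    rcases Nat.mod_two_eq_zero_or_one r with h | h <;> simp [h] <;> omega
  | succ z ih =>
    have hn : n ≠ 0 := by omega
    obtain ⟨m, rfl⟩ := Nat.exists_eq_succ_of_ne_zero hn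
    have h2 : 2 ^ (m + 1) = 2 * 2 ^ m := by ring
    rw [Nat.testBit_succ, Nat.testBit_succ]
    have hdiv : (2 ^ (m + 1) - 1 - r) / 2 = 2 ^ m - 1 - r / 2 := by omega
    rw [hdiv]
    exact ih m (r / 2) (by omega) (by omega)

theorem pvMask_lt (sig : Int) : (PySem.Int.mod sig 65536).toNat < 65536 := by
  rw [PySem.Int.mod_eq_emod_of_pos (by norm_num)]
  have h1 := Int.emod_lt_of_pos sig (b := 65536) (by norm_num)
  omega

-- BRIDGE: A's bit test on sig = the corresponding bit of B's 16-bit mask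
theorem pvBit_eq_testBit (sig : Int) (z : Nat) (hz : z < 16) :
    pvBit sig z = Nat.testBit (PySem.Int.mod sig 65536).toNat z := by
  rw [PySem.Int.mod_eq_emod_of_pos (by norm_num)]
  have hpow : ((2 : Int) ^ z).toNat = 2 ^ z := by
    rw [show ((2:Int)^z) = ((2^z : Nat) : Int) by push_cast; ring, Int.toNat_natCast]
  rcases le_or_gt (0:Int) sig with hs | hs
  · -- nonnegative sig
    have hmod : (sig % 65536).toNat = sig.toNat % 65536 := by omega
    rw [hmod, show (65536 : Nat) = 2 ^ 16 by norm_num, Nat.testBit_mod_two_pow]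
    simp only [pvBit, PySem.Int.band_of_nonneg hs (by positivity : (0:Int) ≤ 2 ^ z), hpow,
      Nat.and_two_pow]
    rcases Bool.eq_false_or_eq_true (sig.toNat.testBit z) with h | h <;> simp [h, hz]
  · -- negative sig: band sig (2^z) ≠ 0 iff bit z of ~sig is clear
    set q : Nat := (-sig - 1).toNat with hq
    have hsig : sig = -((q : Int) + 1) := by omega
    have hband : PySem.Int.band sig ((2:Int) ^ z) = ((2 ^ z - (2 ^ z &&& q) : Nat) : Int) := by
      rw [PySem.Int.band, if_neg (by omega), if_pos (by positivity), hpow]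
    have hm : (sig % 65536).toNat = 65535 - q % 65536 := by omega
    rw [hm, show (65535 : Nat) - q % 65536 = 2 ^ 16 - 1 - q % 65536 by norm_num,
      pvTestBit_compl 16 (q % 65536) z (by omega) hz,
      show (65536 : Nat) = 2 ^ 16 by norm_num, Nat.testBit_mod_two_pow]
    simp only [pvBit, hband]
    rw [Nat.and_comm, Nat.and_two_pow]
    rcases Bool.eq_false_or_eq_true (q.testBit z) with h | h <;>
      simp [h, hz, ]

-- A's first loop is a filter of the descending position list
theorem pvFilter_eq (sig : Int) :
    pvDescRange.foldl (fun acc z =>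
        if PySem.Int.band sig ((2 : Int) ^ z) ≠ 0 then acc ++ [z] else acc) [] =
      (pvDescList 16).filter (pvBit sig) := by
  have h : (fun (acc : List Nat) (z : Nat) =>
      if PySem.Int.band sig ((2 : Int) ^ z) ≠ 0 then acc ++ [z] else acc) =
      (fun acc z => if pvBit sig z = true then acc ++ [id z] else acc) := by
    funext acc z; simp [pvBit]
  rw [h, PySem.List.foldl_append_if (pvBit sig) id pvDescRange []]
  simp [pvDescRange, pvDescList, List.map_id]

-- A's second loop is pvAFold
theorem pvEnumFold_eq (levels : List Int) (zs : List Nat) (c : List Int) (i : Int) :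
    (PySem.List.enumerate zs i).foldl (fun c iz =>
        if iz.1 < (levels.length : Int) then
          c.set (pvZIGZAG.getD iz.2 0) (PySem.List.pyGetD levels iz.1 0)
        else c) c = pvAFold levels c i zs := by
  induction zs generalizing c i with
  | nil => simp [PySem.List.enumerate, pvAFold]
  | cons z zs ih =>
    rw [show PySem.List.enumerate (z::zs) i = (i, z) :: PySem.List.enumerate zs (i+1) from by
      simp [PySem.List.enumerate]]
    simp only [List.foldl_cons, pvAFold]
    exact ih _ _

-- A's indexed fold over the filtered descending list is an order-free pvOp fold:
-- the running index at position z is exactly the popcount of the higher mask bits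
theorem pvAFold_eq_opFold (levels : List Int) (sig : Int) (m : Nat)
    (hm : m = (PySem.Int.mod sig 65536).toNat) :
    ∀ k, k ≤ 16 → ∀ c : List Int,
      pvAFold levels c (pvPc (m >>> k) : Int) ((pvDescList k).filter (pvBit sig)) =
        ((pvDescList k).filter (pvBit sig)).foldl (pvOp levels m) c := by
  intro k
  induction k with
  | zero => intro _ c; simp [pvDescList, pvAFold]
  | succ k ih =>
    intro hk c
    have hk16 : k < 16 := by omega
    have hbit : pvBit sig k = Nat.testBit m k := hm ▸ pvBit_eq_testBit sig k hk16
    rw [show pvDescList (k+1) = k :: pvDescList k from rfl, List.filter_cons]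
    by_cases ht : Nat.testBit m k
    · rw [if_pos (by rw [hbit, ht])]
      have hpc : pvPc (m >>> k) = 1 + pvPc (m >>> (k + 1)) := by
        rw [pvPc_step, if_pos ht]
      rw [pvAFold, List.foldl_cons]
      have hstep : (if (pvPc (m >>> (k+1)) : Int) < (levels.length : Int) then
            c.set (pvZIGZAG.getD k 0) (PySem.List.pyGetD levels (pvPc (m >>> (k+1)) : Int) 0)
          else c) = pvOp levels m c k := by
        unfold pvOp pvTgt
        rw [if_pos ht, PySem.List.pyGetD_natCast]
        rcases lt_or_ge (pvPc (m >>> (k+1))) levels.length with h | h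
        · rw [if_pos (by exact_mod_cast h), if_pos h]
        · rw [if_neg (by exact_mod_cast not_lt.mpr h), if_neg (not_lt.mpr h)]
      rw [hstep]
      have hcast : ((pvPc (m >>> (k+1)) : Int) + 1) = ((pvPc (m >>> k) : Int)) := by
        rw [hpc]; push_cast; ring
      rw [hcast]
      exact ih (by omega) _
    · rw [if_neg (by rw [hbit]; simpa using ht)]
      have hpc : pvPc (m >>> k) = pvPc (m >>> (k + 1)) := by
        rw [pvPc_step, if_neg ht, Nat.zero_add]
      rw [← hpc]
      exact ih (by omega) c

-- B's loop body is pvOp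
theorem pvBFold_eq (levels : List Int) (m : Nat) (c : List Int) :
    (List.range 16).foldl (fun c z =>
      if (m >>> z) &&& 1 = 1 then
        if PySem.Int.bitCount ((m >>> (z + 1) : Nat) : Int) < levels.length then
          c.set (pvZIGZAG.getD z 0)
            (levels.getD (PySem.Int.bitCount ((m >>> (z + 1) : Nat) : Int)) 0)
        else c
      else c) c = (List.range 16).foldl (pvOp levels m) c := by
  have h : (fun (c : List Int) (z : Nat) =>
      if (m >>> z) &&& 1 = 1 then
        if PySem.Int.bitCount ((m >>> (z + 1) : Nat) : Int) < levels.length then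
          c.set (pvZIGZAG.getD z 0)
            (levels.getD (PySem.Int.bitCount ((m >>> (z + 1) : Nat) : Int)) 0)
        else c
      else c) = pvOp levels m := by
    funext c z
    unfold pvOp pvTgt
    rw [pvPc_bitCount, pvTestBit_mod, Nat.and_one_is_mod]
    rcases Nat.mod_two_eq_zero_or_one (m >>> z) with h2 | h2 <;> simp [h2]
  rw [h]

theorem pvOp_length (levels : List Int) (m : Nat) (zs : List Nat) (c : List Int) :
    (zs.foldl (pvOp levels m) c).length = c.length := by
  induction zs generalizing c with
  | nil => rfl
  | cons z zs ih =>
    rw [List.foldl_cons, ih]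
    unfold pvOp; split_ifs <;> simp

theorem pvInv_tgt : ∀ z, z < 16 → pvInv (pvTgt z) = z := by decide
theorem pvTgt_inv : ∀ j, j < 16 → pvTgt (pvInv j) = j := by decide
theorem pvInv_lt : ∀ j, j < 16 → pvInv j < 16 := by decide
theorem pvMem_descList : ∀ z, z < 16 → z ∈ pvDescList 16 := by decide
theorem pvDescList_lt : ∀ z ∈ pvDescList 16, z < 16 := by decide
theorem pvDescList_nodup : (pvDescList 16).Nodup := by decide

theorem pvGetD_set_self (c : List Int) (i : Nat) (a : Int) (h : i < c.length) :
    (c.set i a).getD i 0 = a := by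
  simp [List.getD_eq_getElem?_getD, h]

theorem pvGetD_set_ne (c : List Int) (i j : Nat) (a : Int) (h : i ≠ j) :
    (c.set i a).getD j 0 = c.getD j 0 := by
  simp [List.getD_eq_getElem?_getD, List.getElem?_set_ne h]

-- per-cell value of a pvOp fold over distinct positions < 16
theorem pvOp_getD (levels : List Int) (m : Nat) :
    ∀ (zs : List Nat), zs.Nodup → (∀ z ∈ zs, z < 16) →
      ∀ (c : List Int), c.length = 16 → ∀ j, j < 16 →
      (zs.foldl (pvOp levels m) c).getD j 0 =
        if pvInv j ∈ zs ∧ Nat.testBit m (pvInv j) ∧ pvPc (m >>> (pvInv j + 1)) < levels.length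
        then levels.getD (pvPc (m >>> (pvInv j + 1))) 0
        else c.getD j 0 := by
  intro zs
  induction zs with
  | nil => intro _ _ c _ j _; simp
  | cons z zs ih =>
    intro hnd hlt c hc j hj
    have hndz := (List.nodup_cons.mp hnd).1
    have hnd' := (List.nodup_cons.mp hnd).2
    have hzlt : z < 16 := hlt z (List.mem_cons_self ..)
    rw [List.foldl_cons, ih hnd' (fun w hw => hlt w (List.mem_cons_of_mem _ hw)) _
      (by unfold pvOp; split_ifs <;> simp [hc]) j hj]
    by_cases hez : pvInv j = z
    · -- z is the writer for cell j
      have htgt : pvTgt z = j := hez ▸ pvTgt_inv j hj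
      rw [hez]
      rw [if_neg (fun h => hndz h.1)]
      simp only [List.mem_cons_self, true_and]
      unfold pvOp
      rw [htgt]
      split_ifs with h1 h2 h3 h4 h5 <;> try rfl
      · exact pvGetD_set_self c j _ (by omega)
      · exact absurd ⟨h1, h2⟩ h3
      · exact absurd h4.2 h2
      · exact absurd h5.1 h1
    · -- z writes a different cell (or nothing)
      have htne : pvTgt z ≠ j := fun h => hez ((pvInv_tgt z hzlt) ▸ h ▸ rfl)
      have hstep : (pvOp levels m c z).getD j 0 = c.getD j 0 := by
        unfold pvOp
        split_ifs
        · exact pvGetD_set_ne c _ j _ htne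
        · rfl
        · rfl
      rw [hstep]
      simp only [List.mem_cons, hez, false_or]

-- ===== VERDICT (by name: the statement is the Claim_ definition above) =====
theorem levels_to_raster_spec : Claim_equal_levels_to_raster := by
  intro levels sig_map_hex _ hpre
  unfold Spec_levels_to_raster
  obtain ⟨sig, hsig⟩ := Option.isSome_iff_exists.mp hpre
  unfold levels_to_raster levels_to_raster_alt
  rw [hsig]
  simp only []
  set m : Nat := (PySem.Int.mod sig 65536).toNat with hm
  have hmlt : m < 65536 := pvMask_lt sig
  -- A's side: filter, then pvAFold, then the order-free pvOp fold
  rw [pvFilter_eq, pvEnumFold_eq]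
  have hsh : m >>> 16 = 0 := by
    rw [Nat.shiftRight_eq_div_pow]
    exact Nat.div_eq_of_lt (by norm_num at hmlt ⊢; omega)
  have hA := pvAFold_eq_opFold levels sig m hm 16 (le_refl 16) (List.replicate 16 0)
  rw [hsh, show ((pvPc 0 : Nat) : Int) = 0 from by simp [pvPc]] at hA
  rw [hA]
  -- B's side
  rw [pvBFold_eq]
  -- both are pvOp folds over distinct positions < 16: compare cell by cell
  have hlen1 : ((List.filter (pvBit sig) (pvDescList 16)).foldl (pvOp levels m)
      (List.replicate 16 0)).length = 16 := by rw [pvOp_length]; simp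
  have hlen2 : ((List.range 16).foldl (pvOp levels m)
      (List.replicate 16 0)).length = 16 := by rw [pvOp_length]; simp
  apply List.ext_getElem (by rw [hlen1, hlen2])
  intro j hj1 hj2
  have hj : j < 16 := by omega
  have hgd : ∀ (l : List Int) (h : j < l.length), l[j] = l.getD j 0 := by
    intro l h; simp [List.getD_eq_getElem?_getD, List.getElem?_eq_getElem h]
  rw [hgd _ hj1, hgd _ hj2]
  rw [pvOp_getD levels m _ (pvDescList_nodup.filter _)
      (fun z hz => pvDescList_lt z (List.mem_of_mem_filter hz)) _ (by simp) j hj,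
    pvOp_getD levels m _ (List.nodup_range)
      (fun z hz => List.mem_range.mp hz) _ (by simp) j hj]
  have hinv16 : pvInv j < 16 := pvInv_lt j hj
  have hbit : pvBit sig (pvInv j) = Nat.testBit m (pvInv j) :=
    hm ▸ pvBit_eq_testBit sig (pvInv j) hinv16
  by_cases hb : Nat.testBit m (pvInv j)
  · have hmem1 : pvInv j ∈ List.filter (pvBit sig) (pvDescList 16) :=
      List.mem_filter.mpr ⟨pvMem_descList _ hinv16, by rw [hbit, hb]⟩
    have hmem2 : pvInv j ∈ List.range 16 := List.mem_range.mpr hinv16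
    simp [hmem1, hmem2]
  · have hmem1 : pvInv j ∉ List.filter (pvBit sig) (pvDescList 16) := by
      intro h
      exact hb (by rw [← hbit]; exact (List.mem_filter.mp h).2)
    simp [hmem1, hb]
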